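-- pv_equiv track=rewrite | github.com/maxcreations/vinyller | src/core/context_menu_handler.py | _get_common_genres
-- ===== SOURCE A (Python) =====
-- def _get_common_genres(tracks_list):
--     """
--     Finds and returns a sorted list of genres that are common to all tracks in the provided list.
--     """
--     if not tracks_list:
--         return []
--     common_set = None
--     start_index = 0
--     for i, track in enumerate(tracks_list):
--         track_genres = set(g for g in track.get("genre", []) if g)
--         if track_genres:
--             common_set = track_genres
--             start_index = i + 1
--             break
--     if common_set is None:
--         return []
--     for track in tracks_list[start_index:]:
--         track_genres = set(g for g in track.get("genre", []) if g)
--         common_set.intersection_update(track_genres)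
--         if not common_set:
--             return []
--     return sorted(list(common_set))
-- ===== SOURCE B (Python) =====
-- def _get_common_genres(tracks_list):
--     genre_lists = [[g for g in dict.fromkeys(t.get("genre", [])) if g]
--                    for t in tracks_list]
--     first = next((i for i, gs in enumerate(genre_lists) if gs), None)
--     if first is None:
--         return []
--     tail = genre_lists[first:]
--     n = len(tail)
--     counts = {}
--     for gs in tail:
--         for g in gs:
--             counts[g] = counts.get(g, 0) + 1
--     return sorted(g for g, c in counts.items() if c == n)
-- ===== Notes on version B (the rewrite author's own statement) =====
-- stated objective: alternative
-- what changed: Replaces the mutating set-intersection fold with early exit by a single occurrence-counting pass: build a count map over the tracks from the first non-empty one onward (genres deduplicated per track) and keep the genres whose count equals the number of counted tracks.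
import Mathlib
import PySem

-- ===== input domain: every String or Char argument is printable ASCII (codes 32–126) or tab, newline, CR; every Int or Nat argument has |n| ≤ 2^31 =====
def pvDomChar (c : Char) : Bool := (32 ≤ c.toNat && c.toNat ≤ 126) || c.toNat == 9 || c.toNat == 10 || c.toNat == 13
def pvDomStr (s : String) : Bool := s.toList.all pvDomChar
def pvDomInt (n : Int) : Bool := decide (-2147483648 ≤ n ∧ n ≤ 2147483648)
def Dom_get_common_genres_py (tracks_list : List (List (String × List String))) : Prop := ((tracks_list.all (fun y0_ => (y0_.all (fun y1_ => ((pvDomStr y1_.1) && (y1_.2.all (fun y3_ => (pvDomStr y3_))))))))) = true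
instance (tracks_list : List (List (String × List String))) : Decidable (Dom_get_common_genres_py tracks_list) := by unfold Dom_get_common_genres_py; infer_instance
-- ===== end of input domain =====

-- B replaces A's mutating set-intersection fold (with early exit) by a single counting pass:
-- a count map over the tracks from the first non-empty one onward, keeping genres whose count
-- equals the number of counted tracks; objective: alternative (same cost, different structure).

-- ===== PORT A =====
-- set(g for g in track.get("genre", []) if g)
def pvTrackGenresA (t : List (String × List String)) : PySem.Set String :=
  PySem.Set.ofList ((PySem.Dict.getD (PySem.Dict.mk t) "genre" []).filter (fun g => g ≠ ""))

-- the first loop: find the first track with a non-empty genre set (enumerate + break)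
def pvFindSeedA (tracks : List (List (String × List String))) (i : Nat) :
    Option (PySem.Set String × Nat) :=
  match tracks with
  | [] => none
  | t :: rest =>
    let tg := pvTrackGenresA t
    if tg = [] then pvFindSeedA rest (i + 1) else some (tg, i + 1)

-- the second loop: common_set.intersection_update with the early 'return []' (= none) when empty
def pvInterLoopA (tracks : List (List (String × List String))) (s : PySem.Set String) :
    Option (PySem.Set String) :=
  match tracks with
  | [] => some s
  | t :: rest =>
    let s' := PySem.Set.inter s (pvTrackGenresA t)
    if s' = [] then none else pvInterLoopA rest s'

def get_common_genres_py (tracks_list : List (List (String × List String))) : List String :=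
  if tracks_list = [] then []
  else
    match pvFindSeedA tracks_list 0 with
    | none => []
    | some (commonSet, startIndex) =>
      match pvInterLoopA (PySem.List.slice tracks_list (some (startIndex : Int)) none) commonSet with
      | none => []
      | some s => PySem.List.sorted s (fun x => x) false

-- ===== PORT B =====
-- [g for g in dict.fromkeys(t.get("genre", [])) if g]
def pvTrackGenresB (t : List (String × List String)) : List String :=
  (PySem.List.dedup (PySem.Dict.getD (PySem.Dict.mk t) "genre" [])).filter (fun g => g ≠ "")

-- the body after building genre_lists, factored over that list
def pvAltCore (genreLists : List (List String)) : List String :=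
  match genreLists.findIdx? (fun gs => !gs.isEmpty) with
  | none => []
  | some first =>
    let tail := genreLists.drop first
    let n : Int := tail.length
    let counts := tail.foldl
      (fun d gs => gs.foldl (fun d g => PySem.Dict.insert d g (PySem.Dict.getD d g 0 + 1)) d)
      PySem.Dict.empty
    PySem.List.sorted (((PySem.Dict.items counts).filter (fun p => p.2 == n)).map (fun p => p.1))
      (fun x => x) false

def get_common_genres_py_alt (tracks_list : List (List (String × List String))) : List String :=
  pvAltCore (tracks_list.map pvTrackGenresB)

-- ===== PRECONDITION & SPEC =====
def Spec_get_common_genres_py (tracks_list : List (List (String × List String))) (out : List String) : Prop := out = get_common_genres_py_alt tracks_list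
instance (tracks_list : List (List (String × List String))) (out : List String) : Decidable (Spec_get_common_genres_py tracks_list out) := by unfold Spec_get_common_genres_py; infer_instance

-- ===== CLAIM (what is proved, stated in full; the proofs are below) =====
def Claim_equal_get_common_genres_py : Prop := ∀ (tracks_list : List (List (String × List String))), Dom_get_common_genres_py tracks_list → Spec_get_common_genres_py tracks_list (get_common_genres_py tracks_list)

-- ===== LEMMAS AND PROOFS =====

-- Set.ofList commutes with filter (first-occurrence dedup of a filtered list)
theorem pv_foldl_add_filter (p : String → Bool) (l s : List String) :
    (l.foldl PySem.Set.add s).filter p = (l.filter p).foldl PySem.Set.add (s.filter p) := by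
  induction l generalizing s with
  | nil => rfl
  | cons x rest ih =>
    have hadd : (PySem.Set.add s x).filter p =
        if p x then PySem.Set.add (s.filter p) x else s.filter p := by
      simp only [PySem.Set.add, PySem.Set.contains_eq_listContains]
      by_cases hp : p x
      · simp only [hp, if_true]
        by_cases hm : x ∈ s
        · simp [hm, List.mem_filter.mpr ⟨hm, hp⟩]
        · have : x ∉ s.filter p := fun h => hm (List.mem_filter.mp h).1
          simp [hm, this, hp]
      · by_cases hm : x ∈ s <;> simp [hm, hp]
    simp only [List.foldl_cons, List.filter_cons]
    by_cases hp : p x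
    · rw [ih, hadd, if_pos hp, if_pos hp, List.foldl_cons]
    · rw [ih, hadd, if_neg hp, if_neg hp]

theorem pv_trackGenres_eq (t : List (String × List String)) :
    pvTrackGenresA t = pvTrackGenresB t := by
  unfold pvTrackGenresA pvTrackGenresB
  rw [PySem.List.dedup_eq_ofList, PySem.Set.ofList_eq_foldl, PySem.Set.ofList_eq_foldl]
  simpa using (pv_foldl_add_filter (fun g => decide (g ≠ ""))
    (PySem.Dict.getD (PySem.Dict.mk t) "genre" []) []).symm

theorem pv_trackGenresB_nodup (t : List (String × List String)) :
    (pvTrackGenresB t).Nodup := by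
  unfold pvTrackGenresB
  exact (PySem.List.nodup_dedup _).filter _

-- the seed loop, in terms of the mapped genre lists and findIdx?
theorem pv_seed_eq (tl : List (List (String × List String))) (i : Nat) :
    pvFindSeedA tl i =
      ((tl.map pvTrackGenresB).findIdx? (fun gs => !gs.isEmpty)).map
        (fun k => (((tl.map pvTrackGenresB).drop k).headI, i + k + 1)) := by
  induction tl generalizing i with
  | nil => rfl
  | cons t rest ih =>
    simp only [pvFindSeedA, List.map_cons, List.findIdx?_cons, pv_trackGenres_eq]
    by_cases h : pvTrackGenresB t = []
    · simp only [h, List.isEmpty_nil, Bool.not_true, ih (i + 1)]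
      cases hf : (rest.map pvTrackGenresB).findIdx? (fun gs => !gs.isEmpty) with
      | none => simp
      | some k =>
        simp only [Option.map_some]
        simp [List.drop_succ_cons, Prod.ext_iff]
        omega
    · have hb : (!(pvTrackGenresB t).isEmpty) = true := by simp [h]
      simp [h, hb]

-- the intersection fold from an empty set stays empty
theorem pv_foldl_inter_nil (ls : List (List String)) :
    ls.foldl PySem.Set.inter ([] : PySem.Set String) = [] := by
  induction ls with
  | nil => rfl
  | cons l rest ih => simpa [PySem.Set.inter] using ih

-- the early-exit loop computes the full intersection fold over the genre lists
theorem pv_interLoop_eq (tl : List (List (String × List String))) (s : PySem.Set String) :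
    (match pvInterLoopA tl s with
      | none => ([] : List String)
      | some r => r) =
      (tl.map pvTrackGenresB).foldl PySem.Set.inter s := by
  induction tl generalizing s with
  | nil => rfl
  | cons t rest ih =>
    simp only [pvInterLoopA, List.map_cons, List.foldl_cons, pv_trackGenres_eq]
    by_cases h : PySem.Set.inter s (pvTrackGenresB t) = []
    · simp [h, pv_foldl_inter_nil]
    · simp [h, ih]

theorem pv_mem_foldl_inter (ls : List (List String)) (s : PySem.Set String) (g : String) :
    g ∈ ls.foldl PySem.Set.inter s ↔ g ∈ s ∧ ∀ l ∈ ls, g ∈ l := by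
  induction ls generalizing s with
  | nil => simp
  | cons l rest ih =>
    simp only [List.foldl_cons, ih, PySem.Set.mem_inter, List.mem_cons]
    constructor
    · rintro ⟨⟨hs, ht⟩, hrest⟩
      refine ⟨hs, fun m hm => ?_⟩
      rcases hm with rfl | hm
      · exact ht
      · exact hrest m hm
    · rintro ⟨hs, hall⟩
      exact ⟨⟨hs, hall l (Or.inl rfl)⟩, fun m hm => hall m (Or.inr hm)⟩

theorem pv_nodup_foldl_inter (ls : List (List String)) (s : PySem.Set String) (hs : s.Nodup) :
    (ls.foldl PySem.Set.inter s).Nodup := by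
  induction ls generalizing s with
  | nil => exact hs
  | cons l rest ih => exact ih _ (PySem.Set.nodup_inter _ _ hs)

-- count of g in the flattened tail equals the length exactly when g is in every member
theorem pv_count_flatten_eq_len (g : String) (ls : List (List String))
    (hnd : ∀ l ∈ ls, l.Nodup) :
    (ls.flatten.count g = ls.length ↔ ∀ l ∈ ls, g ∈ l) := by
  induction ls with
  | nil => simp
  | cons l rest ih =>
    have hl : l.Nodup := hnd l (List.mem_cons_self ..)
    have ihr := ih (fun m hm => hnd m (List.mem_cons_of_mem _ hm))
    have h1 : l.count g ≤ 1 := List.nodup_iff_count_le_one.mp hl g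
    have h2 : rest.flatten.count g ≤ rest.length := by
      calc rest.flatten.count g = (rest.map (List.count g)).sum := List.count_flatten ..
        _ ≤ (rest.map (fun _ => 1)).sum := by
            apply List.sum_le_sum
            intro l' hl'
            exact List.nodup_iff_count_le_one.mp (hnd l' (List.mem_cons_of_mem _ hl')) g
        _ = rest.length := by simp
    simp only [List.flatten_cons, List.count_append, List.length_cons]
    constructor
    · intro h
      have hcl : l.count g = 1 := by omega
      have hcr : rest.flatten.count g = rest.length := by omega
      intro l' hl'
      rcases List.mem_cons.mp hl' with rfl | hl'
      · exact List.count_pos_iff.mp (by omega)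
      · exact ihr.mp hcr l' hl'
    · intro h
      have hcl : l.count g = 1 :=
        List.count_eq_one_of_mem hl (h l (List.mem_cons_self ..))
      have hcr : rest.flatten.count g = rest.length :=
        ihr.mpr (fun l' hl' => h l' (List.mem_cons_of_mem _ hl'))
      omega

-- the counting block of B is the counter over the flattened tail; its kept keys filtered
theorem pv_counts_filter_eq (tail : List (List String)) :
    ((PySem.Dict.items
        (tail.foldl
          (fun d gs =>
            gs.foldl (fun d g => PySem.Dict.insert d g (PySem.Dict.getD d g 0 + 1)) d)
          PySem.Dict.empty)).filter (fun p => p.2 == (tail.length : Int))).map (fun p => p.1) =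
      (PySem.Set.ofList tail.flatten).filter
        (fun k => (tail.flatten.count k : Int) == (tail.length : Int)) := by
  have hfold : tail.foldl
      (fun d gs => gs.foldl (fun d g => PySem.Dict.insert d g (PySem.Dict.getD d g 0 + 1)) d)
      PySem.Dict.empty = PySem.Dict.counter tail.flatten := by
    rw [← PySem.Dict.foldl_insert_getD_add_one_eq_counter, ← List.foldl_flatten]
  rw [hfold, PySem.Dict.items_counter, List.filter_map, List.map_map]
  simp [Function.comp_def]

-- the core equality for a found first index: sorted intersection = sorted count-filtered keys
theorem pv_sorted_core_eq (gl : List (List String)) (k : Nat)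
    (hnd : ∀ l ∈ gl, l.Nodup) (hk : k < gl.length) :
    PySem.List.sorted ((gl.drop (k + 1)).foldl PySem.Set.inter ((gl.drop k).headI))
      (fun x => x) false =
    PySem.List.sorted
      ((PySem.Set.ofList (gl.drop k).flatten).filter
        (fun g => ((gl.drop k).flatten.count g : Int) == ((gl.drop k).length : Int)))
      (fun x => x) false := by
  have hdrop : gl.drop k = gl[k] :: gl.drop (k + 1) := List.drop_eq_getElem_cons hk
  have hndk : ∀ l ∈ gl.drop k, l.Nodup := fun l hl => hnd l (List.mem_of_mem_drop hl)
  rw [hdrop] at hndk ⊢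
  simp only [List.headI_cons]
  apply PySem.List.sorted_eq_sorted_of_perm _ _ _ (fun a b h => h)
  apply (List.perm_ext_iff_of_nodup ?_ ?_).mpr
  · intro g
    rw [pv_mem_foldl_inter, List.mem_filter, PySem.Set.mem_ofList, beq_iff_eq, Int.natCast_inj,
      pv_count_flatten_eq_len g _ hndk]
    constructor
    · rintro ⟨hs, hrest⟩
      have hall : ∀ l ∈ gl[k] :: gl.drop (k + 1), g ∈ l := by
        intro l hl
        rcases List.mem_cons.mp hl with rfl | hl
        · exact hs
        · exact hrest l hl
      exact ⟨List.mem_flatten.mpr ⟨gl[k], List.mem_cons_self .., hall _ (List.mem_cons_self ..)⟩,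
        hall⟩
    · rintro ⟨-, hall⟩
      exact ⟨hall _ (List.mem_cons_self ..), fun l hl => hall l (List.mem_cons_of_mem _ hl)⟩
  · exact pv_nodup_foldl_inter _ _ (hndk _ (List.mem_cons_self ..))
  · exact (PySem.Set.nodup_ofList _).filter _

-- ===== VERDICT (by name: the statement is the Claim_ definition above) =====
theorem get_common_genres_py_spec : Claim_equal_get_common_genres_py := by
  intro tl _
  unfold Spec_get_common_genres_py get_common_genres_py get_common_genres_py_alt pvAltCore
  rw [pv_seed_eq]
  cases hf : (tl.map pvTrackGenresB).findIdx? (fun gs => !gs.isEmpty) with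
  | none =>
    cases tl with
    | nil => simp
    | cons t rest => simp
  | some k =>
    have htl : tl ≠ [] := by
      rintro rfl; simp at hf
    have hk : k < tl.length := by
      have := (List.findIdx?_eq_some_iff_findIdx_eq.mp hf).1
      simpa using this
    have hkm : k < (tl.map pvTrackGenresB).length := by simpa using hk
    simp only [if_neg htl, Option.map_some, Nat.zero_add]
    have hslice : PySem.List.slice tl (some ((k + 1 : Nat) : Int)) none = tl.drop (k + 1) :=
      PySem.List.slice_from_natCast ..
    rw [hslice]
    have hloop := pv_interLoop_eq (tl.drop (k + 1)) ((tl.map pvTrackGenresB).drop k).headI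
    rw [List.map_drop] at hloop
    have hnd : ∀ l ∈ tl.map pvTrackGenresB, l.Nodup := by
      intro l hl
      obtain ⟨t, _, rfl⟩ := List.mem_map.mp hl
      exact pv_trackGenresB_nodup t
    have hcore := pv_sorted_core_eq (tl.map pvTrackGenresB) k hnd hkm
    rw [pv_counts_filter_eq]
    cases hI : pvInterLoopA (tl.drop (k + 1)) ((tl.map pvTrackGenresB).drop k).headI with
    | none =>
      have hnil : ((tl.map pvTrackGenresB).drop (k + 1)).foldl PySem.Set.inter
          ((tl.map pvTrackGenresB).drop k).headI = [] := by
        rw [← hloop, hI]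
      rw [hnil] at hcore
      simpa using hcore.symm
    | some s =>
      have hs : s = ((tl.map pvTrackGenresB).drop (k + 1)).foldl PySem.Set.inter
          ((tl.map pvTrackGenresB).drop k).headI := by
        rw [← hloop, hI]
      rw [hs]
      exact hcore
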